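-- pv_equiv track=rewrite | github.com/buckle2000/google-kickstart | advent-of-code/2015/17/sol.py | bestfit
-- ===== SOURCE A (Python) =====
-- def bestfit(containers, total):
--     assert len(containers) > 0
--     if total == 0:
--         return [0]
--     if len(containers) == 1:
--         if total == containers[0]:
--             return [1]
--         else:
--             return []
--     else:
--         cc = containers[1:]
--         return bestfit(cc, total) +\
--         [i+1 for i in bestfit(cc, total - containers[0])]
-- ===== SOURCE B (Python) =====
-- def bestfit(containers, total):
--     assert len(containers) > 0
--     n = len(containers)
--     memo = {}
--
--     def go(i, t):
--         key = (i, t)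
--         if key in memo:
--             return memo[key]
--         if t == 0:
--             res = [0]
--         elif i == n - 1:
--             res = [1] if t == containers[i] else []
--         else:
--             res = go(i + 1, t) + [x + 1 for x in go(i + 1, t - containers[i])]
--         memo[key] = res
--         return res
--
--     return go(0, total)
-- ===== Notes on version B (the rewrite author's own statement) =====
-- stated objective: alternative
-- what changed: B memoizes the recursion on (suffix index, remaining total) in a dict (dynamic programming over suffix states) instead of A's naive double recursion, producing the identical list in the identical order; on large inputs both remain bound by the (exponential) output size.
import Mathlib
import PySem

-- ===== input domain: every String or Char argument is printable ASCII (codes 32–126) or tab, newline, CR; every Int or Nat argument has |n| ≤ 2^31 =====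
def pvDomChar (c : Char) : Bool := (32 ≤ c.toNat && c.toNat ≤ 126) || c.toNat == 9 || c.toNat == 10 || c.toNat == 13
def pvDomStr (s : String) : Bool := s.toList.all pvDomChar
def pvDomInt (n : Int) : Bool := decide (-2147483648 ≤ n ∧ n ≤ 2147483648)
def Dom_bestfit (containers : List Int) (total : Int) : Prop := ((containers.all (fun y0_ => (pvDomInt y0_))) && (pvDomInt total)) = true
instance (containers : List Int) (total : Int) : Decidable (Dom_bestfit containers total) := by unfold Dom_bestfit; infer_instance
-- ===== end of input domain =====

-- B computes the same list by memoizing the recursion on (suffix index, remaining total) in a dict instead of A's naive double recursion; identical list, identical order.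

-- ===== PORT A =====
-- literal transliteration of A: naive double recursion on the tail of the list
def bestfit : List Int → Int → List Int
  | [], _ => []          -- A's `assert len(containers) > 0` fails here (AssertionError); excluded by Pre_
  | [c], total => if total = 0 then [0] else if total = c then [1] else []
  | c :: d :: cc, total =>
      if total = 0 then [0]
      else bestfit (d :: cc) total ++ (bestfit (d :: cc) (total - c)).map (· + 1)

-- ===== PORT B =====
-- transliteration of Source B's inner `go(i, t)` with its memo dict threaded through;
-- `fuel` (initially n) is a totality guard only: the recursion depth is at most n - 1.
def bestfitGo (containers : List Int) (n : Nat) (fuel : Nat) (i t : Int)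
    (memo : PySem.Dict (Int × Int) (List Int)) :
    List Int × PySem.Dict (Int × Int) (List Int) :=
  match memo.get? (i, t) with
  | some r => (r, memo)
  | none =>
    if t = 0 then ([0], memo.insert (i, t) [0])
    else if i = (n : Int) - 1 then
      -- containers[i]: i is a valid index on every reached call, so the default is never used
      let res := if t = PySem.List.pyGetD containers i 0 then [(1 : Int)] else []
      (res, memo.insert (i, t) res)
    else
      match fuel with
      | 0 => ([], memo)   -- unreachable with fuel = n (totality guard)
      | fuel' + 1 =>
        let p1 := bestfitGo containers n fuel' (i + 1) t memo
        let p2 := bestfitGo containers n fuel' (i + 1) (t - PySem.List.pyGetD containers i 0) p1.2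
        let res := p1.1 ++ p2.1.map (· + 1)
        (res, p2.2.insert (i, t) res)

def bestfit_alt (containers : List Int) (total : Int) : List Int :=
  (bestfitGo containers containers.length containers.length 0 total PySem.Dict.empty).1

-- ===== PRECONDITION & SPEC =====
-- Pre_ excludes the empty list, on which A's `assert len(containers) > 0` raises AssertionError (B asserts identically).
def Pre_bestfit (containers : List Int) (total : Int) : Prop := containers ≠ []
instance (containers : List Int) (total : Int) : Decidable (Pre_bestfit containers total) := by unfold Pre_bestfit; infer_instance
def pvWitness_bestfit : List Int × Int := ([1, 2, 3], 3)

def Spec_bestfit (containers : List Int) (total : Int) (out : List Int) : Prop := out = bestfit_alt containers total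
instance (containers : List Int) (total : Int) (out : List Int) : Decidable (Spec_bestfit containers total out) := by unfold Spec_bestfit; infer_instance

-- ===== CLAIM (what is proved, stated in full; the proofs are below) =====
def Claim_equal_bestfit : Prop := ∀ (containers : List Int) (total : Int), Dom_bestfit containers total → Pre_bestfit containers total → Spec_bestfit containers total (bestfit containers total)

-- ===== LEMMAS AND PROOFS =====

-- the memo only ever holds correct values: memo[(i, t)] = A's answer on the i-th suffix
def GoodMemo (containers : List Int) (memo : PySem.Dict (Int × Int) (List Int)) : Prop :=
  ∀ i t r, memo.get? (i, t) = some r → r = bestfit (containers.drop i.toNat) t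

lemma bestfit_zero (xs : List Int) (h : xs ≠ []) : bestfit xs 0 = [0] := by
  match xs with
  | [c] => simp [bestfit]
  | c :: d :: cc => simp [bestfit]

lemma bestfit_cons_step (c : Int) (xs : List Int) (t : Int) (h : xs ≠ []) (ht : t ≠ 0) :
    bestfit (c :: xs) t = bestfit xs t ++ (bestfit xs (t - c)).map (· + 1) := by
  match xs with
  | d :: cc => simp [bestfit, ht]

lemma goodMemo_insert (containers : List Int) (memo : PySem.Dict (Int × Int) (List Int))
    (i t : Int) (res : List Int) (hg : GoodMemo containers memo)
    (hres : res = bestfit (containers.drop i.toNat) t) :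
    GoodMemo containers (memo.insert (i, t) res) := by
  intro i' t' r hr
  rw [PySem.Dict.get?_insert] at hr
  by_cases hk : (i', t') = (i, t)
  · simp [hk] at hr
    obtain ⟨h1, h2⟩ := Prod.mk.injEq .. ▸ hk
    subst h1; subst h2; subst hr; exact hres
  · rw [if_neg hk] at hr
    exact hg i' t' r hr

lemma go_spec (containers : List Int) :
    ∀ (fuel : Nat) (i t : Int) (memo : PySem.Dict (Int × Int) (List Int)),
    0 ≤ i → i < (containers.length : Int) →
    containers.length - 1 - i.toNat ≤ fuel →
    GoodMemo containers memo →
    (bestfitGo containers containers.length fuel i t memo).1 = bestfit (containers.drop i.toNat) t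
    ∧ GoodMemo containers (bestfitGo containers containers.length fuel i t memo).2 := by
  intro fuel
  induction fuel with
  | zero =>
    intro i t memo hi0 hin hf hg
    have hiN : i.toNat < containers.length := by omega
    cases hmem : memo.get? (i, t) with
    | some r =>
      simp only [bestfitGo, hmem]
      exact ⟨hg i t r hmem, hg⟩
    | none =>
      by_cases ht : t = 0
      · subst ht
        have hz := bestfit_zero (containers.drop i.toNat)
          (by intro h; rw [List.drop_eq_nil_iff] at h; omega)
        simp only [bestfitGo, hmem]
        exact ⟨hz.symm, goodMemo_insert _ _ _ _ _ hg hz.symm⟩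
      · by_cases hne : i = (containers.length : Int) - 1
        · have hd : containers.drop i.toNat = [containers[i.toNat]] := by
            rw [List.drop_eq_getElem_cons hiN, List.drop_eq_nil_of_le (by omega)]
          have hget : PySem.List.pyGetD containers i 0 = containers[i.toNat] :=
            PySem.List.pyGetD_eq_getElem containers 0 hi0 hin
          have hres : (if t = PySem.List.pyGetD containers i 0 then [(1 : Int)] else [])
              = bestfit (containers.drop i.toNat) t := by
            rw [hd, hget]; simp [bestfit, ht]
          simp only [bestfitGo, hmem, if_neg ht, if_pos hne]
          exact ⟨hres, goodMemo_insert _ _ _ _ _ hg hres⟩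
        · exfalso; omega
  | succ fuel' ih =>
    intro i t memo hi0 hin hf hg
    have hiN : i.toNat < containers.length := by omega
    cases hmem : memo.get? (i, t) with
    | some r =>
      simp only [bestfitGo, hmem]
      exact ⟨hg i t r hmem, hg⟩
    | none =>
      by_cases ht : t = 0
      · subst ht
        have hz := bestfit_zero (containers.drop i.toNat)
          (by intro h; rw [List.drop_eq_nil_iff] at h; omega)
        simp only [bestfitGo, hmem]
        exact ⟨hz.symm, goodMemo_insert _ _ _ _ _ hg hz.symm⟩
      · by_cases hne : i = (containers.length : Int) - 1
        · have hd : containers.drop i.toNat = [containers[i.toNat]] := by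
            rw [List.drop_eq_getElem_cons hiN, List.drop_eq_nil_of_le (by omega)]
          have hget : PySem.List.pyGetD containers i 0 = containers[i.toNat] :=
            PySem.List.pyGetD_eq_getElem containers 0 hi0 hin
          have hres : (if t = PySem.List.pyGetD containers i 0 then [(1 : Int)] else [])
              = bestfit (containers.drop i.toNat) t := by
            rw [hd, hget]; simp [bestfit, ht]
          simp only [bestfitGo, hmem, if_neg ht, if_pos hne]
          exact ⟨hres, goodMemo_insert _ _ _ _ _ hg hres⟩
        · have hlt : i.toNat < containers.length - 1 := by omega
          have h1 := ih (i + 1) t memo (by omega) (by omega) (by omega) hg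
          have h2 := ih (i + 1) (t - PySem.List.pyGetD containers i 0)
            (bestfitGo containers containers.length fuel' (i + 1) t memo).2
            (by omega) (by omega) (by omega) h1.2
          have hsucc : (i + 1).toNat = i.toNat + 1 := by omega
          have hget : PySem.List.pyGetD containers i 0 = containers[i.toNat] :=
            PySem.List.pyGetD_eq_getElem containers 0 hi0 hin
          have hstep : bestfit (containers.drop i.toNat) t
              = bestfit (containers.drop (i.toNat + 1)) t
                ++ (bestfit (containers.drop (i.toNat + 1)) (t - containers[i.toNat])).map (· + 1) := by
            rw [List.drop_eq_getElem_cons hiN]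
            exact bestfit_cons_step _ _ _
              (by intro h; rw [List.drop_eq_nil_iff] at h; omega) ht
          have hres : (bestfitGo containers containers.length fuel' (i + 1) t memo).1
                ++ ((bestfitGo containers containers.length fuel' (i + 1)
                      (t - PySem.List.pyGetD containers i 0)
                      (bestfitGo containers containers.length fuel' (i + 1) t memo).2).1).map (· + 1)
              = bestfit (containers.drop i.toNat) t := by
            rw [hstep, h1.1, h2.1, hsucc, hget]
          simp only [bestfitGo, hmem, if_neg ht, if_neg hne]
          exact ⟨hres, goodMemo_insert _ _ _ _ _ h2.2 hres⟩

-- ===== VERDICT (by name: the statement is the Claim_ definition above) =====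
theorem bestfit_spec : Claim_equal_bestfit := by
  intro containers total _ hpre
  unfold Spec_bestfit bestfit_alt
  have hlen : 0 < containers.length := List.length_pos_iff.mpr hpre
  have h := go_spec containers containers.length 0 total PySem.Dict.empty
    le_rfl (by exact_mod_cast hlen) (by omega)
    (by intro i t r hr; simp [PySem.Dict.get?_empty] at hr)
  simpa using h.1.symm
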